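-- pv_equiv track=rewrite | github.com/tirinox/thorchainmonitorbot | app/jobs/scanner/util.py | thor_decode_amount_field
-- ===== SOURCE A (Python) =====
-- def thor_decode_amount_field(string: str):
--     if ' ' in string:
--         # Handle cases with space, e.g. "114731984 rune" or "BSC.BNB-0x33434 900514"
--         amt, asset = string.split(' ', maxsplit=1)
--         if not amt.isdigit() and asset.isdigit():
--             # swap
--             amt, asset = asset, amt
--     else:
--         """ e.g. 114731984rune """
--         amt, asset = '', ''
--         still_numbers = True
--         for symbol in string:
--             if not str.isdigit(symbol):
--                 still_numbers = False
--             if still_numbers: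
--                 amt += symbol
--             else:
--                 asset += symbol
--
--     asset = asset.strip().upper()
--     if not asset:
--         raise ValueError(f"Asset part is empty in string: {string!r}")
--     elif ' ' in asset:
--         raise ValueError(f"Asset part contains space in string: {string!r}")
--
--     try:
--         amt = int(amt)
--         return amt, asset.strip().upper()
--     except ValueError:
--         raise ValueError(f"Unable to parse amount and asset from string: {string!r}")
-- ===== SOURCE B (Python) =====
-- def thor_decode_amount_field(string: str):
--     if ' ' in string:
--         amt, asset = string.split(' ', maxsplit=1)
--         if not amt.isdigit() and asset.isdigit():
--             amt, asset = asset, amt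
--     else:
--         i = next((j for j, c in enumerate(string) if not c.isdigit()), len(string))
--         amt, asset = string[:i], string[i:]
--
--     asset = asset.strip().upper()
--     if not asset:
--         raise ValueError(f"Asset part is empty in string: {string!r}")
--     if ' ' in asset:
--         raise ValueError(f"Asset part contains space in string: {string!r}")
--
--     try:
--         return int(amt), asset
--     except ValueError:
--         raise ValueError(f"Unable to parse amount and asset from string: {string!r}")
-- ===== Notes on version B (the rewrite author's own statement) =====
-- stated objective: simpler
-- what changed: In the no-space branch the two-accumulator flag loop is replaced by finding the first non-digit index and slicing the string there, and the redundant second strip().upper() of the already-normalised asset is dropped.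
import Mathlib
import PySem

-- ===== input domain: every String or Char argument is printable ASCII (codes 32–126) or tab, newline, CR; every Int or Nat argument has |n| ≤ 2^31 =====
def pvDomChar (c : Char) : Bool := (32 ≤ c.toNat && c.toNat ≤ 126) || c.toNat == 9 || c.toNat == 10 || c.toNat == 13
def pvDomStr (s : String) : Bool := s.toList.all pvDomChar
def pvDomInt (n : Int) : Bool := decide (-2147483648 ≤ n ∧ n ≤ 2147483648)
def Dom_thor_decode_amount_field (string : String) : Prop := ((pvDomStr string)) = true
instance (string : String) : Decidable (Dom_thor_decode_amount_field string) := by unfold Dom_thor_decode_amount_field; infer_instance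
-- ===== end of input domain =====

-- B drops A's redundant second strip().upper() and replaces A's two-accumulator flag
-- loop (no-space branch) with a first-non-digit index search plus two slices.

-- ===== PORT A =====
-- one loop step of A's no-space branch: state (amt, asset, still_numbers)
def pvAStep (st : List Char × List Char × Bool) (symbol : Char) :
    List Char × List Char × Bool :=
  let still := if !(PySem.Chars.isdigit symbol) then false else st.2.2
  if still then (st.1 ++ [symbol], st.2.1, still) else (st.1, st.2.1 ++ [symbol], still)

def thor_decode_amount_field (string : String) : Int × String :=
  let p :=
    if PySem.Str.isIn " " string then
      match PySem.Str.splitMax? string " " 1 with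
      | some (a :: b :: _) =>
          if !(PySem.Str.strIsdigit a) && PySem.Str.strIsdigit b then (b, a) else (a, b)
      | _ => ("", "")  -- unreachable: splitting on " " when ' ' ∈ string gives two parts
    else
      let st := string.toList.foldl pvAStep ([], [], true)
      (String.ofList st.1, String.ofList st.2.1)
  let amt := p.1
  let asset := PySem.Str.upper (PySem.Str.strip p.2)
  if asset = "" then (0, "")                           -- raise ValueError: outside Pre_
  else if PySem.Str.isIn " " asset then (0, "")        -- raise ValueError: outside Pre_
  else
    match PySem.Int.ofStr? amt with
    | some n => (n, PySem.Str.upper (PySem.Str.strip asset))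
    | none => (0, "")                                  -- raise ValueError: outside Pre_

-- ===== PORT B =====
def thor_decode_amount_field_alt (string : String) : Int × String :=
  let p :=
    if PySem.Str.isIn " " string then
      -- amt, asset = string.split(' ', maxsplit=1): with ' ' in string this
      -- yields exactly two parts, read positionally
      let parts := (PySem.Str.splitMax? string " " 1).getD []
      let a := parts.getD 0 ""
      let b := parts.getD 1 ""
      if !(PySem.Str.strIsdigit a) && PySem.Str.strIsdigit b then (b, a) else (a, b)
    else
      let cs := string.toList
      -- i = next((j for j, c in enumerate(string) if not c.isdigit()), len(string));
      -- findIdx is exactly this first-hit index (length when no hit);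
      -- string[:i] / string[i:] with 0 ≤ i ≤ len are take/drop (exact)
      let i := cs.findIdx (fun c => !(PySem.Chars.isdigit c))
      (String.ofList (cs.take i), String.ofList (cs.drop i))
  let amt := p.1
  let asset := PySem.Str.upper (PySem.Str.strip p.2)
  if asset = "" then (0, "")                           -- raise ValueError: outside Pre_
  else if PySem.Str.isIn " " asset then (0, "")        -- raise ValueError: outside Pre_
  else
    -- int(amt): Option.map/getD in place of A's match; none = ValueError, outside Pre_
    ((PySem.Int.ofStr? amt).map (fun n => (n, asset))).getD (0, "")

-- ===== PRECONDITION & SPEC =====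
-- the (amount, asset) split of the input, stated independently of both ports
def pvParts (string : String) : String × String :=
  if PySem.Str.isIn " " string then
    let parts := (PySem.Str.splitMax? string " " 1).getD []
    let a := parts.getD 0 ""
    let b := parts.getD 1 ""
    if !(PySem.Str.strIsdigit a) && PySem.Str.strIsdigit b then (b, a) else (a, b)
  else
    (String.ofList (string.toList.takeWhile PySem.Chars.isdigit),
     String.ofList (string.toList.dropWhile PySem.Chars.isdigit))

-- Pre_ holds exactly where Python A returns (no ValueError): the asset part is
-- nonempty after stripping, contains no space, and int() accepts the amount part.
def Pre_thor_decode_amount_field (string : String) : Prop :=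
  PySem.Str.upper (PySem.Str.strip (pvParts string).2) ≠ "" ∧
  PySem.Str.isIn " " (PySem.Str.upper (PySem.Str.strip (pvParts string).2)) = false ∧
  (PySem.Int.ofStr? (pvParts string).1).isSome = true
instance (string : String) : Decidable (Pre_thor_decode_amount_field string) := by
  unfold Pre_thor_decode_amount_field; infer_instance

def pvWitness_thor_decode_amount_field : String := "114731984 rune"

def Spec_thor_decode_amount_field (string : String) (out : Int × String) : Prop :=
  out = thor_decode_amount_field_alt string
instance (string : String) (out : Int × String) :
    Decidable (Spec_thor_decode_amount_field string out) := by
  unfold Spec_thor_decode_amount_field; infer_instance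

-- ===== CLAIM (what is proved, stated in full; the proofs are below) =====
def Claim_equal_thor_decode_amount_field : Prop :=
  ∀ (string : String), Dom_thor_decode_amount_field string →
    Pre_thor_decode_amount_field string →
    Spec_thor_decode_amount_field string (thor_decode_amount_field string)

-- ===== LEMMAS AND PROOFS =====

lemma pvAStep_foldl_false (cs : List Char) (amt asset : List Char) :
    cs.foldl pvAStep (amt, asset, false) = (amt, asset ++ cs, false) := by
  induction cs generalizing asset with
  | nil => simp
  | cons c cs ih => simp [pvAStep, ih]

lemma pvAStep_foldl_true (cs : List Char) (amt asset : List Char) :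
    cs.foldl pvAStep (amt, asset, true) =
      (amt ++ cs.takeWhile PySem.Chars.isdigit,
       asset ++ cs.dropWhile PySem.Chars.isdigit,
       cs.all PySem.Chars.isdigit) := by
  induction cs generalizing amt with
  | nil => simp
  | cons c cs ih =>
    by_cases h : PySem.Chars.isdigit c
    · simp only [List.foldl_cons]
      have hs : pvAStep (amt, asset, true) c = (amt ++ [c], asset, true) := by
        simp [pvAStep, h]
      rw [hs, ih]
      simp [h]
    · simp only [List.foldl_cons]
      have hs : pvAStep (amt, asset, true) c = (amt, asset ++ [c], false) := by
        simp [pvAStep, h]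
      rw [hs, pvAStep_foldl_false]
      simp [h]

lemma take_findIdx_not (cs : List Char) (d : Char → Bool) :
    cs.take (cs.findIdx (fun c => !(d c))) = cs.takeWhile d := by
  induction cs with
  | nil => rfl
  | cons c cs ih =>
    by_cases h : d c <;> simp [List.findIdx_cons, h, ih]

lemma drop_findIdx_not (cs : List Char) (d : Char → Bool) :
    cs.drop (cs.findIdx (fun c => !(d c))) = cs.dropWhile d := by
  induction cs with
  | nil => rfl
  | cons c cs ih =>
    by_cases h : d c <;> simp [List.findIdx_cons, h, ih]

lemma toNat_sub32 (c : Char) (hb : 97 ≤ c.toNat) (hb' : c.toNat ≤ 122) :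
    (Char.ofNat (c.toNat - 32)).toNat = c.toNat - 32 := by
  rw [Char.toNat_ofNat, if_pos]
  exact Or.inl (by omega)

lemma islower_iff (c : Char) :
    PySem.Chars.islower c = true ↔ 97 ≤ c.toNat ∧ c.toNat ≤ 122 := by
  unfold PySem.Chars.islower
  simp [Char.le_def, UInt32.le_iff_toNat_le]

lemma isspace_upperChar (c : Char) :
    PySem.Chars.isspace (PySem.Chars.upperChar c) = PySem.Chars.isspace c := by
  unfold PySem.Chars.upperChar
  by_cases h : PySem.Chars.islower c = true
  · obtain ⟨h1, h2⟩ := (islower_iff c).mp h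
    have hv := toNat_sub32 c h1 h2
    simp only [h, if_pos]
    unfold PySem.Chars.isspace
    apply Bool.eq_iff_iff.mpr
    simp only [hv, Bool.or_eq_true, Bool.and_eq_true, decide_eq_true_eq]
    omega
  · simp [h]

lemma upperChar_idem (c : Char) :
    PySem.Chars.upperChar (PySem.Chars.upperChar c) = PySem.Chars.upperChar c := by
  unfold PySem.Chars.upperChar
  by_cases h : PySem.Chars.islower c = true
  · obtain ⟨h1, h2⟩ := (islower_iff c).mp h
    have hv := toNat_sub32 c h1 h2
    simp only [h, if_pos]
    have hnl : PySem.Chars.islower (Char.ofNat (c.toNat - 32)) = false := by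
      rw [Bool.eq_false_iff]
      intro hc
      obtain ⟨g1, g2⟩ := (islower_iff _).mp hc
      rw [hv] at g1 g2
      omega
    simp [hnl]
  · simp [h]

lemma dropWhile_idem {α : Type} (p : α → Bool) (l : List α) :
    (l.dropWhile p).dropWhile p = l.dropWhile p := by
  induction l with
  | nil => rfl
  | cons a t ih =>
    by_cases h : p a <;> simp [h, ih]

lemma lstrip_rstrip_of_lstripped (x : List Char)
    (h : PySem.Chars.lstrip x = x) :
    PySem.Chars.lstrip (PySem.Chars.rstrip x) = PySem.Chars.rstrip x := by
  cases x with
  | nil => rfl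
  | cons a t =>
    have ha : PySem.Chars.isspace a = false := by
      by_contra hc
      have hc' : PySem.Chars.isspace a = true := by
        cases hx : PySem.Chars.isspace a
        · exact absurd hx hc
        · rfl
      unfold PySem.Chars.lstrip at h
      rw [List.dropWhile_cons, if_pos hc'] at h
      have := congrArg List.length h
      simp at this
      have := List.length_dropWhile_le (p := PySem.Chars.isspace) (l := t)
      omega
    unfold PySem.Chars.rstrip PySem.Chars.lstrip
    rw [show (a :: t).reverse = t.reverse ++ [a] by simp]
    rw [List.dropWhile_append]
    by_cases hall : (t.reverse.dropWhile PySem.Chars.isspace).isEmpty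
    · simp [hall, ha]
    · simp only [hall, if_neg, Bool.false_eq_true, not_false_iff]
      rw [List.reverse_append]
      simp [ha]

lemma strip_strip (l : List Char) :
    PySem.Chars.strip (PySem.Chars.strip l) = PySem.Chars.strip l := by
  unfold PySem.Chars.strip
  have h1 : PySem.Chars.lstrip (PySem.Chars.lstrip l) = PySem.Chars.lstrip l := by
    unfold PySem.Chars.lstrip; exact dropWhile_idem _ _
  rw [lstrip_rstrip_of_lstripped _ h1]
  unfold PySem.Chars.rstrip
  simp [dropWhile_idem]

lemma lstrip_upper_comm (l : List Char) :
    PySem.Chars.lstrip (PySem.Chars.upper l) = PySem.Chars.upper (PySem.Chars.lstrip l) := by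
  unfold PySem.Chars.lstrip PySem.Chars.upper
  have hf : (PySem.Chars.isspace ∘ PySem.Chars.upperChar) = PySem.Chars.isspace :=
    funext fun c => isspace_upperChar c
  rw [List.dropWhile_map, hf]

lemma rstrip_upper_comm (l : List Char) :
    PySem.Chars.rstrip (PySem.Chars.upper l) = PySem.Chars.upper (PySem.Chars.rstrip l) := by
  unfold PySem.Chars.rstrip PySem.Chars.upper
  have hf : (PySem.Chars.isspace ∘ PySem.Chars.upperChar) = PySem.Chars.isspace :=
    funext fun c => isspace_upperChar c
  rw [← List.map_reverse, List.dropWhile_map, hf, ← List.map_reverse]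

lemma strip_upper_comm (l : List Char) :
    PySem.Chars.strip (PySem.Chars.upper l) = PySem.Chars.upper (PySem.Chars.strip l) := by
  unfold PySem.Chars.strip
  rw [lstrip_upper_comm, rstrip_upper_comm]

lemma upper_idem (l : List Char) :
    PySem.Chars.upper (PySem.Chars.upper l) = PySem.Chars.upper l := by
  unfold PySem.Chars.upper
  have hf : (PySem.Chars.upperChar ∘ PySem.Chars.upperChar) = PySem.Chars.upperChar :=
    funext fun c => upperChar_idem c
  rw [List.map_map, hf]

-- the second strip().upper() in A is the identity on the already-normalised asset
lemma strip_upper_strip_upper (s : String) :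
    PySem.Str.upper (PySem.Str.strip (PySem.Str.upper (PySem.Str.strip s))) =
      PySem.Str.upper (PySem.Str.strip s) := by
  apply String.toList_injective
  simp only [PySem.Str.toList_upper, PySem.Str.toList_strip]
  rw [strip_upper_comm, upper_idem, strip_strip]

lemma finish_eq (amt a : String) (ha : PySem.Str.upper (PySem.Str.strip a) = a) :
    (if a = "" then ((0 : Int), "")
     else if PySem.Str.isIn " " a then ((0 : Int), "")
     else
       match PySem.Int.ofStr? amt with
       | some n => (n, PySem.Str.upper (PySem.Str.strip a))
       | none => ((0 : Int), "")) =
    (if a = "" then ((0 : Int), "")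
     else if PySem.Str.isIn " " a then ((0 : Int), "")
     else ((PySem.Int.ofStr? amt).map (fun n => (n, a))).getD ((0 : Int), "")) := by
  rw [ha]
  split_ifs
  · rfl
  · rfl
  · cases PySem.Int.ofStr? amt with
    | none => rfl
    | some n => rfl

-- ===== VERDICT (by name: the statement is the Claim_ definition above) =====
set_option maxHeartbeats 800000 in
theorem thor_decode_amount_field_spec : Claim_equal_thor_decode_amount_field := by
  intro string _ _
  unfold Spec_thor_decode_amount_field thor_decode_amount_field thor_decode_amount_field_alt
  by_cases h : PySem.Str.isIn " " string
  · simp only [h, if_true]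
    obtain ⟨o, hsp⟩ : ∃ o, PySem.Str.splitMax? string " " 1 = o := ⟨_, rfl⟩
    match o with
    | none =>
      simp [hsp, show PySem.Chars.strIsdigit [] = false from rfl,
        show ("" : String).toList = [] from rfl,
        show PySem.Str.upper (PySem.Str.strip "") = "" from rfl]
    | some [] =>
      simp [hsp, show PySem.Chars.strIsdigit [] = false from rfl,
        show ("" : String).toList = [] from rfl,
        show PySem.Str.upper (PySem.Str.strip "") = "" from rfl]
    | some [a] =>
      simp [hsp, show PySem.Chars.strIsdigit [] = false from rfl,
        show ("" : String).toList = [] from rfl,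
        show PySem.Str.upper (PySem.Str.strip "") = "" from rfl]
    | some (a :: b :: rest) =>
      simp only [hsp]
      exact finish_eq _ _ (strip_upper_strip_upper _)
  · simp only [h, Bool.false_eq_true, if_false]
    rw [pvAStep_foldl_true, take_findIdx_not, drop_findIdx_not]
    simp only [List.nil_append]
    exact finish_eq _ _ (strip_upper_strip_upper _)
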